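-- pv_equiv track=rewrite | github.com/tmdgh1592/AlgorithmMentoring | 이동현/BOJ_3085.py | check
-- ===== SOURCE A (Python) =====
-- def check(size, arr, switch):
--     max = 1
--     continuous = 1
--     if switch == 0:
--         for i in range(size):
--             for j in range(size-1):
--                 if arr[i][j] == arr[i][j+1]:
--                     continuous += 1
--                     if continuous >= max:
--                         max = continuous
--                 else:
--                     continuous = 1
--             continuous = 1
--     else:
--         for i in range(size):
--             for j in range(size-1):
--                 if arr[j][i] == arr[j+1][i]:
--                     continuous += 1
--                     if continuous >= max:
--                         max = continuous
--                 else: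
--                     continuous = 1
--             continuous = 1
--     return max
-- ===== SOURCE B (Python) =====
-- def check(size, arr, switch):
--     if size < 2:
--         return 1
--     best = 1
--     for i in range(size):
--         if switch == 0:
--             line = arr[i][:size]
--         else:
--             line = [row[i] for row in arr[:size]]
--         while line:
--             v = line[0]
--             k = 1
--             while k < len(line) and line[k] == v:
--                 k += 1
--             if k > best:
--                 best = k
--             line = line[k:]
--     return best
-- ===== Notes on version B (the rewrite author's own statement) =====
-- stated objective: simpler
-- what changed: B replaces A's running-counter-with-reset state machine over index pairs by a per-line decomposition into maximal runs of equal cells (early-returning 1 for grids smaller than 2), taking the maximum run length per line.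
import Mathlib
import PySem

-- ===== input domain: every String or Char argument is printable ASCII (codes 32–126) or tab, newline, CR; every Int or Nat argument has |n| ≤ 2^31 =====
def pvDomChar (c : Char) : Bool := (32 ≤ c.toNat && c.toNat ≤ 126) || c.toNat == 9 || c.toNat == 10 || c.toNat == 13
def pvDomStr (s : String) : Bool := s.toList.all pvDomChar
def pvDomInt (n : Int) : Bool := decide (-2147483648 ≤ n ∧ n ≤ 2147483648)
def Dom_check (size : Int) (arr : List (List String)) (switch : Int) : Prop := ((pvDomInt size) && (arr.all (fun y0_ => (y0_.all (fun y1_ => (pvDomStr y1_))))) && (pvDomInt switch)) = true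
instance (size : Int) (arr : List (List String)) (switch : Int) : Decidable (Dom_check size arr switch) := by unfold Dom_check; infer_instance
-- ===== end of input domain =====

-- B replaces A's running-counter-with-reset state machine by a per-line maximal-run
-- decomposition (objective: simpler); same return value on every input Pre_check admits.

-- ===== PORT A =====
-- arr[i][j]; total form, used only at indices Pre_check keeps in range (exact there)
def pyCell (arr : List (List String)) (i j : Int) : String :=
  PySem.List.pyGetD (PySem.List.pyGetD arr i []) j ""

def check (size : Int) (arr : List (List String)) (switch : Int) : Int :=
  if switch == 0 then
    ((PySem.List.pyRange 0 size 1).foldl (fun (s : Int × Int) i =>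
      let s2 := (PySem.List.pyRange 0 (size - 1) 1).foldl (fun (t : Int × Int) j =>
        if pyCell arr i j == pyCell arr i (j + 1) then
          let c := t.2 + 1
          ((if c ≥ t.1 then c else t.1), c)
        else (t.1, 1)) s
      (s2.1, 1)) ((1 : Int), (1 : Int))).1
  else
    ((PySem.List.pyRange 0 size 1).foldl (fun (s : Int × Int) i =>
      let s2 := (PySem.List.pyRange 0 (size - 1) 1).foldl (fun (t : Int × Int) j =>
        if pyCell arr j i == pyCell arr (j + 1) i then
          let c := t.2 + 1
          ((if c ≥ t.1 then c else t.1), c)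
        else (t.1, 1)) s
      (s2.1, 1)) ((1 : Int), (1 : Int))).1

-- ===== PORT B =====
-- B's inner "while k < len(line) and line[k] == v: k += 1" counts the prefix of line[1:]
-- equal to v (a takeWhile length); "line = line[k:]" then drops that prefix.
def lineBest (best : Int) (line : List String) : Int :=
  match line with
  | [] => best
  | v :: rest =>
    let t := (rest.takeWhile (fun x => x == v)).length
    lineBest (if 1 + (t : Int) > best then 1 + (t : Int) else best) (rest.drop t)
termination_by line.length
decreasing_by simp [List.length_drop]

def check_alt (size : Int) (arr : List (List String)) (switch : Int) : Int :=
  if size < 2 then 1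
  else
    (PySem.List.pyRange 0 size 1).foldl (fun best i =>
      let line := if switch == 0 then
          PySem.List.slice (PySem.List.pyGetD arr i []) none (some size)
        else
          (PySem.List.slice arr none (some size)).map (fun row => PySem.List.pyGetD row i "")
      lineBest best line) 1

-- ===== PRECONDITION & SPEC =====
-- Pre_check excludes exactly the inputs where A raises IndexError: size ≥ 2 but the grid
-- does not supply size rows each of length ≥ size (for size ≤ 1 A touches no cell).
def Pre_check (size : Int) (arr : List (List String)) (switch : Int) : Prop :=
  2 ≤ size → (size ≤ (arr.length : Int) ∧ ∀ row ∈ arr.take size.toNat, size ≤ (row.length : Int))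
instance (size : Int) (arr : List (List String)) (switch : Int) : Decidable (Pre_check size arr switch) := by unfold Pre_check; infer_instance

def pvWitness_check : Int × List (List String) × Int := (2, ([["a", "b"], ["a", "a"]], 0))

def Spec_check (size : Int) (arr : List (List String)) (switch : Int) (out : Int) : Prop := out = check_alt size arr switch
instance (size : Int) (arr : List (List String)) (switch : Int) (out : Int) : Decidable (Spec_check size arr switch out) := by unfold Spec_check; infer_instance

-- ===== CLAIM (what is proved, stated in full; the proofs are below) =====
def Claim_equal_check : Prop := ∀ (size : Int) (arr : List (List String)) (switch : Int), Dom_check size arr switch → Pre_check size arr switch → Spec_check size arr switch (check size arr switch)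

-- ===== LEMMAS AND PROOFS =====

-- A's inner-loop state machine, as a recursion over the line itself
def lineA (s : Int × Int) : List String → Int × Int
  | a :: b :: rest =>
      lineA (if a == b then ((if s.2 + 1 ≥ s.1 then s.2 + 1 else s.1), s.2 + 1) else (s.1, 1)) (b :: rest)
  | _ => s

theorem inner_shift (F : String → String → (Int × Int) → Int × Int)
    (a : String) (xs : List String) (m : Nat) (s : Int × Int) :
    (PySem.List.pyRange 1 ((m : Int) + 1) 1).foldl
      (fun t j => F (PySem.List.pyGetD (a :: xs) j "") (PySem.List.pyGetD (a :: xs) (j + 1) "") t) s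
    = (PySem.List.pyRange 0 (m : Int) 1).foldl
      (fun t j => F (PySem.List.pyGetD xs j "") (PySem.List.pyGetD xs (j + 1) "") t) s := by
  rw [PySem.List.pyRange_one 1 ((m : Int) + 1), PySem.List.pyRange_one 0 (m : Int)]
  have hm : (((m : Int) + 1 - 1).toNat) = m := by omega
  have hm0 : (((m : Int) - 0).toNat) = m := by omega
  rw [hm, hm0, List.foldl_map, List.foldl_map]
  congr 1
  funext t k
  have e1 : PySem.List.pyGetD (a :: xs) (1 + (k : Int)) "" = PySem.List.pyGetD xs (0 + (k : Int)) "" := by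
    rw [show (1 + (k : Int)) = ((k + 1 : Nat) : Int) by push_cast; ring,
        show (0 + (k : Int)) = ((k : Nat) : Int) by ring,
        PySem.List.pyGetD_natCast, PySem.List.pyGetD_natCast, List.getD_cons_succ]
  have e2 : PySem.List.pyGetD (a :: xs) (1 + (k : Int) + 1) "" = PySem.List.pyGetD xs (0 + (k : Int) + 1) "" := by
    rw [show (1 + (k : Int) + 1) = (((k + 1) + 1 : Nat) : Int) by push_cast; ring,
        show (0 + (k : Int) + 1) = ((k + 1 : Nat) : Int) by push_cast; ring,
        PySem.List.pyGetD_natCast, PySem.List.pyGetD_natCast, List.getD_cons_succ]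
  rw [e1, e2]

theorem inner_fold_eq_lineA (L : List String) (s : Int × Int) :
    (PySem.List.pyRange 0 ((L.length : Int) - 1) 1).foldl
      (fun (t : Int × Int) j =>
        if PySem.List.pyGetD L j "" == PySem.List.pyGetD L (j + 1) "" then
          ((if t.2 + 1 ≥ t.1 then t.2 + 1 else t.1), t.2 + 1)
        else (t.1, 1)) s
    = lineA s L := by
  induction L generalizing s with
  | nil => simp [lineA, PySem.List.pyRange_one_eq_nil]
  | cons a rest ih =>
    match rest with
    | [] => simp [lineA, PySem.List.pyRange_one_eq_nil]
    | b :: r =>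
      have hlen : ((a :: b :: r).length : Int) - 1 = (((b :: r).length - 1 : Nat) : Int) + 1 := by
        simp
      rw [hlen, PySem.List.pyRange_one_cons (by positivity), List.foldl_cons,
          show (0 : Int) + 1 = 1 from rfl,
          inner_shift (fun x y (t : Int × Int) =>
            if x == y then ((if t.2 + 1 ≥ t.1 then t.2 + 1 else t.1), t.2 + 1) else (t.1, 1))
            a (b :: r) ((b :: r).length - 1),
          show (((b :: r).length - 1 : Nat) : Int) = ((b :: r).length : Int) - 1 by push_cast [List.length_cons]; omega,
          ih]
      have g0 : PySem.List.pyGetD (a :: b :: r) 0 "" = a := by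
        simp
      have g1 : PySem.List.pyGetD (a :: b :: r) 1 "" = b := by
        simp [pysem]
      rw [g0, g1]
      rfl

theorem lineA_run (v : String) (eqs rest' : List String)
    (heq : ∀ x ∈ eqs, x = v)
    (hr : ∀ w, rest'.head? = some w → w ≠ v)
    (m c : Int) (hc : c ≤ m) :
    (lineA (m, c) (v :: (eqs ++ rest'))).1
      = (lineA (max m (c + (eqs.length : Int)), 1) rest').1 := by
  induction eqs generalizing v m c with
  | nil =>
    simp only [List.nil_append, List.length_nil, Nat.cast_zero, add_zero, max_eq_left hc]
    match rest' with
    | [] => simp [lineA]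
    | w :: rr =>
      have hw : (v == w) = false := by
        have := hr w rfl
        simp; exact fun h => this h.symm
      simp [lineA, hw]
  | cons x eqs' ih =>
    have hx : x = v := heq x (by simp)
    subst hx
    show (lineA (if (x == x) then ((if c + 1 ≥ m then c + 1 else m), c + 1) else (m, 1))
            (x :: (eqs' ++ rest'))).1 = _
    rw [beq_self_eq_true x, if_pos rfl]
    have hmax : (if c + 1 ≥ m then c + 1 else m) = max m (c + 1) := by
      split_ifs <;> omega
    rw [hmax, ih x (fun y hy => heq y (List.mem_cons_of_mem _ hy)) hr (max m (c + 1)) (c + 1) (by omega)]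
    congr 2
    simp [List.length_cons]
    omega

theorem lineBest_ge (L : List String) (m : Int) : m ≤ lineBest m L := by
  induction m, L using lineBest.induct with
  | case1 b => simp [lineBest]
  | case2 best v rest t ih =>
    rw [lineBest]
    refine le_trans ?_ ih
    split_ifs <;> omega

theorem drop_takeWhile_length (p : String → Bool) (l : List String) :
    l.drop (l.takeWhile p).length = l.dropWhile p := by
  induction l with
  | nil => rfl
  | cons a l ih => by_cases h : p a <;> simp [h, ih]

theorem lineA_eq_lineBest (L : List String) (m : Int) :
    1 ≤ m → (lineA (m, 1) L).1 = lineBest m L := by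
  induction m, L using lineBest.induct with
  | case1 b => intro _; simp [lineA, lineBest]
  | case2 best v rest t ih =>
    intro hb
    have ht : t = (rest.takeWhile (fun x => x == v)).length := rfl
    rw [ht] at ih
    simp only [dite_eq_ite] at ih
    have hsplit : rest = rest.takeWhile (fun x => x == v) ++ rest.dropWhile (fun x => x == v) :=
      (List.takeWhile_append_dropWhile).symm
    have heq : ∀ x ∈ rest.takeWhile (fun x => x == v), x = v := by
      intro x hx
      have := List.mem_takeWhile_imp hx
      simpa using this
    have hr : ∀ w, (rest.dropWhile (fun x => x == v)).head? = some w → w ≠ v := by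
      intro w hw
      rw [← List.find?_not_eq_head?_dropWhile] at hw
      have := List.find?_some hw
      simpa using this
    have hdrop : rest.drop ((rest.takeWhile (fun x => x == v)).length)
        = rest.dropWhile (fun x => x == v) := drop_takeWhile_length _ _
    have hif : (if 1 + (((rest.takeWhile (fun x => x == v)).length : Nat) : Int) > best
        then 1 + (((rest.takeWhile (fun x => x == v)).length : Nat) : Int) else best)
        = max best (1 + (((rest.takeWhile (fun x => x == v)).length : Nat) : Int)) := by
      split_ifs <;> omega
    rw [hdrop, hif] at ih
    have lhs : (lineA (best, 1) (v :: rest)).1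
        = (lineA (max best (1 + ((rest.takeWhile (fun x => x == v)).length : Int)), 1)
            (rest.dropWhile (fun x => x == v))).1 := by
      conv_lhs => rw [show (v :: rest) = (v :: (rest.takeWhile (fun x => x == v) ++ rest.dropWhile (fun x => x == v))) by rw [← hsplit]]
      exact lineA_run v _ _ heq hr best 1 hb
    rw [lhs, lineBest]
    simp only [hdrop, hif]
    exact ih (by omega)

theorem pyGetD_take (l : List String) (n : Nat) (j : Int) (h0 : 0 ≤ j) (hj : j < (n : Int)) :
    PySem.List.pyGetD (l.take n) j "" = PySem.List.pyGetD l j "" := by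
  rw [show j = ((j.toNat : Nat) : Int) by omega, PySem.List.pyGetD_natCast, PySem.List.pyGetD_natCast]
  have hjn : j.toNat < n := by omega
  simp [List.getD, hjn]

theorem cell_map_take (arr : List (List String)) (n : Nat) (i j : Int)
    (h0 : 0 ≤ j) (hj : j < (n : Int)) (hn : n ≤ arr.length) :
    PySem.List.pyGetD ((arr.take n).map (fun row => PySem.List.pyGetD row i "")) j ""
      = pyCell arr j i := by
  rw [show j = ((j.toNat : Nat) : Int) by omega, PySem.List.pyGetD_natCast]
  have hjn : j.toNat < n := by omega
  have hja : j.toNat < arr.length := by omega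
  unfold pyCell
  rw [PySem.List.pyGetD_natCast]
  simp [List.getD, hjn, hja]

theorem outer_fold (Lf : Int → List String) (is : List Int) (m : Int) (hm : 1 ≤ m) :
    ((is.foldl (fun (s : Int × Int) i => ((lineA s (Lf i)).1, 1)) (m, 1))).1
      = is.foldl (fun b i => lineBest b (Lf i)) m := by
  induction is generalizing m with
  | nil => rfl
  | cons i is' ih =>
    simp only [List.foldl_cons]
    rw [lineA_eq_lineBest _ _ hm]
    exact ih _ (le_trans hm (lineBest_ge _ _))

theorem check_eq (size : Int) (arr : List (List String)) (switch : Int)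
    (hpre : 2 ≤ size → (size ≤ (arr.length : Int) ∧ ∀ row ∈ arr.take size.toNat, size ≤ (row.length : Int))) :
    check size arr switch = check_alt size arr switch := by
  by_cases hs : size < 2
  · -- degenerate grids: both sides are 1
    rw [check_alt, if_pos hs]
    have hcase : size ≤ 0 ∨ size = 1 := by omega
    by_cases hbc : switch == 0
    all_goals rcases hcase with h0 | h1
    · rw [check, if_pos hbc]
      simp [PySem.List.pyRange_one_eq_nil h0]
    · subst h1
      rw [check, if_pos hbc]
      simp [show PySem.List.pyRange 0 1 1 = [0] from PySem.List.pyRange_one_singleton 0]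
    · rw [check, if_neg hbc]
      simp [PySem.List.pyRange_one_eq_nil h0]
    · subst h1
      rw [check, if_neg hbc]
      simp [show PySem.List.pyRange 0 1 1 = [0] from PySem.List.pyRange_one_singleton 0]
  · have hs2 : 2 ≤ size := by omega
    obtain ⟨hlen, hrow⟩ := hpre hs2
    by_cases hbc : switch == 0
    · -- row mode
      set Lf : Int → List String :=
        fun i => (PySem.List.pyGetD arr i []).take size.toNat with hLf
      have hLlen : ∀ i, 0 ≤ i → i < size → ((Lf i).length : Int) = size := by
        intro i h0 h1
        have hia : i.toNat < arr.length := by omega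
        have hrowi : PySem.List.pyGetD arr i [] = arr[i.toNat] :=
          PySem.List.pyGetD_eq_getElem (xs := arr) (i := i) (d := []) h0 (by exact_mod_cast h1.trans_le hlen)
        have hmem : arr[i.toNat] ∈ arr.take size.toNat :=
          List.mem_take_iff_getElem.2 ⟨i.toNat, by omega, by simp⟩
        have := hrow _ hmem
        simp [hLf, hrowi]
        omega
      have hA : check size arr switch
          = ((PySem.List.pyRange 0 size 1).foldl
              (fun (s : Int × Int) i => ((lineA s (Lf i)).1, 1)) ((1 : Int), (1 : Int))).1 := by
        rw [check, if_pos hbc]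
        refine congrArg Prod.fst ?_
        apply PySem.List.foldl_congr_mem
        intro s i hi
        have him : 0 ≤ i ∧ i < size := (PySem.List.mem_pyRange_one).1 hi
        have hinner : (PySem.List.pyRange 0 (size - 1) 1).foldl (fun (t : Int × Int) j =>
            if pyCell arr i j == pyCell arr i (j + 1) then
              ((if t.2 + 1 ≥ t.1 then t.2 + 1 else t.1), t.2 + 1)
            else (t.1, 1)) s
            = (PySem.List.pyRange 0 (((Lf i).length : Int) - 1) 1).foldl (fun (t : Int × Int) j =>
            if PySem.List.pyGetD (Lf i) j "" == PySem.List.pyGetD (Lf i) (j + 1) "" then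
              ((if t.2 + 1 ≥ t.1 then t.2 + 1 else t.1), t.2 + 1)
            else (t.1, 1)) s := by
          rw [hLlen i him.1 him.2]
          apply PySem.List.foldl_congr_mem
          intro t j hj
          have hjm : 0 ≤ j ∧ j < size - 1 := (PySem.List.mem_pyRange_one).1 hj
          unfold pyCell
          rw [hLf]
          rw [pyGetD_take _ _ j hjm.1 (by omega), pyGetD_take _ _ (j + 1) (by omega) (by omega)]
        rw [hinner, inner_fold_eq_lineA]
      have hB : check_alt size arr switch
          = (PySem.List.pyRange 0 size 1).foldl (fun b i => lineBest b (Lf i)) 1 := by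
        rw [check_alt, if_neg hs]
        apply PySem.List.foldl_congr_mem
        intro b i hi
        show lineBest b _ = lineBest b (Lf i)
        rw [if_pos hbc, hLf, PySem.List.slice_to _ (by omega : (0:Int) ≤ size)]
      rw [hA, hB]
      exact outer_fold Lf _ 1 le_rfl
    · -- column mode
      set Lf : Int → List String :=
        fun i => (arr.take size.toNat).map (fun row => PySem.List.pyGetD row i "") with hLf
      have hLlen : ∀ i, ((Lf i).length : Int) = size := by
        intro i
        simp [hLf]
        omega
      have hA : check size arr switch
          = ((PySem.List.pyRange 0 size 1).foldl
              (fun (s : Int × Int) i => ((lineA s (Lf i)).1, 1)) ((1 : Int), (1 : Int))).1 := by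
        rw [check, if_neg hbc]
        refine congrArg Prod.fst ?_
        apply PySem.List.foldl_congr_mem
        intro s i hi
        have hinner : (PySem.List.pyRange 0 (size - 1) 1).foldl (fun (t : Int × Int) j =>
            if pyCell arr j i == pyCell arr (j + 1) i then
              ((if t.2 + 1 ≥ t.1 then t.2 + 1 else t.1), t.2 + 1)
            else (t.1, 1)) s
            = (PySem.List.pyRange 0 (((Lf i).length : Int) - 1) 1).foldl (fun (t : Int × Int) j =>
            if PySem.List.pyGetD (Lf i) j "" == PySem.List.pyGetD (Lf i) (j + 1) "" then
              ((if t.2 + 1 ≥ t.1 then t.2 + 1 else t.1), t.2 + 1)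
            else (t.1, 1)) s := by
          rw [hLlen i]
          apply PySem.List.foldl_congr_mem
          intro t j hj
          have hjm : 0 ≤ j ∧ j < size - 1 := (PySem.List.mem_pyRange_one).1 hj
          rw [hLf]
          rw [cell_map_take arr size.toNat i j hjm.1 (by omega) (by omega),
              cell_map_take arr size.toNat i (j + 1) (by omega) (by omega) (by omega)]
        rw [hinner, inner_fold_eq_lineA]
      have hB : check_alt size arr switch
          = (PySem.List.pyRange 0 size 1).foldl (fun b i => lineBest b (Lf i)) 1 := by
        rw [check_alt, if_neg hs]
        apply PySem.List.foldl_congr_mem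
        intro b i hi
        show lineBest b _ = lineBest b (Lf i)
        rw [if_neg hbc, hLf, PySem.List.slice_to _ (by omega : (0:Int) ≤ size)]
      rw [hA, hB]
      exact outer_fold Lf _ 1 le_rfl

-- ===== VERDICT (by name: the statement is the Claim_ definition above) =====
theorem check_spec : Claim_equal_check := by
  intro size arr switch _ hpre
  unfold Spec_check
  exact check_eq size arr switch hpre
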